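-- pv_equiv track=rewrite | github.com/1364168761/Test | work13/maze_solver.py | suggest_pos
-- ===== SOURCE A (Python) =====
-- class CellType:
--     ROAD = 0
--     WALL = 1
--     WALKED = 2
--     DEAD = 3
--
-- def suggest_pos(cells): #传入点集
--     arr = []
--     for cell in cells:
--         if cell:
--             arr.append(cell[0]) #(t,r,d,l)
--         else:
--             arr.append(CellType.DEAD)
--     return cells[arr.index(min(arr))] #返回能走的上、下、左、右中val值最小的，因为其中0,1,2,3分别代表路，墙，走过，死胡同
-- ===== SOURCE B (Python) =====
-- class CellType:
--     ROAD = 0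
--     WALL = 1
--     WALKED = 2
--     DEAD = 3
--
-- def suggest_pos(cells):
--     # Stable sort by cell value, then take the head: stability guarantees the
--     # FIRST cell achieving the minimal value is returned, matching A's
--     # arr.index(min(arr)). Empty cells sort with the DEAD value.
--     ordered = sorted(cells, key=lambda cell: cell[0] if cell else CellType.DEAD)
--     return ordered[0]
-- ===== Notes on version B (the rewrite author's own statement) =====
-- stated objective: alternative
-- what changed: B stably sorts cells by the value key (cell[0], or DEAD for empty cells) and returns the head of the sorted list, replacing A's four-stage pipeline (build a parallel key list, min() over it, list.index, index back into cells); stability of sorted makes the head the first minimal cell, so ties match A.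
import Mathlib
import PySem

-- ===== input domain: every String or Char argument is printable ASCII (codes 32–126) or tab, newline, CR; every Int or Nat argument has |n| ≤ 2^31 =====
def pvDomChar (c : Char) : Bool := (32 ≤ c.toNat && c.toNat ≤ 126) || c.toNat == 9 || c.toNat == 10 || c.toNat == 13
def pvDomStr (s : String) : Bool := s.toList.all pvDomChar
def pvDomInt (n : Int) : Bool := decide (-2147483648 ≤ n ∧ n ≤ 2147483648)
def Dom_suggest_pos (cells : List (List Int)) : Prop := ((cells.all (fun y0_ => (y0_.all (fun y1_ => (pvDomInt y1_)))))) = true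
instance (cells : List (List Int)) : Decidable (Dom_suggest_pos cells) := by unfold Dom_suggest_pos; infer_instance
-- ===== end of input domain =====

-- B stably sorts the cells by their value key and returns the head (first minimal cell),
-- replacing A's key-list/min/index/index-back pipeline; an alternative algorithm, same result.

-- ===== PORT A =====
def suggest_pos (cells : List (List Int)) : List Int :=
  -- arr = []; for cell in cells: arr.append(cell[0] if cell else DEAD)
  let arr := cells.foldl (fun acc cell =>
    if cell ≠ [] then acc ++ [(PySem.List.pyGet? cell 0).getD 0]
    else acc ++ [(3 : Int)]) []
  -- return cells[arr.index(min(arr))]  — min([]) raises ValueError (excluded by Pre_)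
  match PySem.List.min? arr (fun x => x) with
  | none => []
  | some m =>
    match PySem.List.index? arr m with
    | none => []
    | some i => (PySem.List.pyGet? cells (i : Int)).getD []

-- ===== PORT B =====
def suggest_pos_alt (cells : List (List Int)) : List Int :=
  -- ordered = sorted(cells, key=lambda cell: cell[0] if cell else CellType.DEAD)
  let ordered := PySem.List.sorted cells
    (fun cell => if cell ≠ [] then (PySem.List.pyGet? cell 0).getD 0 else (3 : Int)) false
  -- return ordered[0]  — raises IndexError on empty cells (excluded by Pre_)
  (PySem.List.pyGet? ordered 0).getD []

-- ===== PRECONDITION & SPEC =====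
-- Pre_ excludes only the empty list, on which A's min raises ValueError (and B's [0] raises IndexError).
def Pre_suggest_pos (cells : List (List Int)) : Prop := cells ≠ []
instance (cells : List (List Int)) : Decidable (Pre_suggest_pos cells) := by unfold Pre_suggest_pos; infer_instance
def pvWitness_suggest_pos : List (List Int) := [[1, 2, 3, 4], [], [0, 9], [0, 5]]

def Spec_suggest_pos (cells : List (List Int)) (out : List Int) : Prop := out = suggest_pos_alt cells
instance (cells : List (List Int)) (out : List Int) : Decidable (Spec_suggest_pos cells out) := by unfold Spec_suggest_pos; infer_instance

-- ===== CLAIM (what is proved, stated in full; the proofs are below) =====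
def Claim_equal_suggest_pos : Prop := ∀ (cells : List (List Int)), Dom_suggest_pos cells → Pre_suggest_pos cells → Spec_suggest_pos cells (suggest_pos cells)

-- ===== LEMMAS AND PROOFS =====

-- the common key: cell[0] if cell else DEAD
def pvKey (cell : List Int) : Int :=
  if cell ≠ [] then (PySem.List.pyGet? cell 0).getD 0 else 3

-- the first-minimal selection step both characterisations reduce to
def pvG (m x : List Int) : List Int := if pvKey x < pvKey m then x else m

lemma arr_eq_map (cells : List (List Int)) :
    cells.foldl (fun acc cell =>
      if cell ≠ [] then acc ++ [(PySem.List.pyGet? cell 0).getD 0]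
      else acc ++ [(3 : Int)]) [] = cells.map pvKey := by
  have hf : (fun (acc : List Int) cell =>
      if cell ≠ [] then acc ++ [(PySem.List.pyGet? cell 0).getD 0]
      else acc ++ [(3 : Int)]) = (fun acc cell => acc ++ [pvKey cell]) := by
    funext acc cell
    by_cases h : cell = [] <;> simp [pvKey, h]
  rw [hf, PySem.List.foldl_append_singleton_eq_map, List.nil_append]

-- A's "index back into cells" pass returns exactly the first minimal cell, i.e. l.foldl pvG c.
lemma main_lemma (l : List (List Int)) (c : List Int) :
    (match PySem.List.index? (pvKey c :: l.map pvKey) ((l.map pvKey).foldl min (pvKey c)) with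
     | none => ([] : List Int)
     | some i => (PySem.List.pyGet? (c :: l) (i : Int)).getD []) = l.foldl pvG c := by
  induction l generalizing c with
  | nil =>
      simp
  | cons d t ih =>
      simp only [List.map_cons, List.foldl_cons]
      by_cases h : pvKey d < pvKey c
      · -- new head d strictly improves: reduce to the list (d :: t)
        have hmin : min (pvKey c) (pvKey d) = pvKey d := min_eq_right (le_of_lt h)
        rw [hmin]
        have hle : (t.map pvKey).foldl min (pvKey d) ≤ pvKey d :=
          (PySem.List.foldl_min_le (t.map pvKey) (pvKey d)).1
        have hne : pvKey c ≠ (t.map pvKey).foldl min (pvKey d) := by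
          intro he; omega
        rw [PySem.List.index?_cons_of_ne _ hne]
        have hmem : (t.map pvKey).foldl min (pvKey d) ∈ pvKey d :: t.map pvKey := by
          rcases PySem.List.foldl_min_mem (t.map pvKey) (pvKey d) with h1 | h1
          · rw [h1]; exact List.mem_cons_self
          · exact List.mem_cons_of_mem _ h1
        obtain ⟨j, hj⟩ := Option.isSome_iff_exists.mp
          ((PySem.List.index?_isSome_iff _ _).mpr hmem)
        have ihd := ih d
        rw [hj] at ihd ⊢
        have hgcd : pvG c d = d := by simp [pvG, h]
        have hget : PySem.List.pyGet? (c :: d :: t) ((j + 1 : Nat) : Int)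
            = PySem.List.pyGet? (d :: t) ((j : Nat) : Int) := by
          rw [PySem.List.pyGet?_natCast, PySem.List.pyGet?_natCast]
          simp
        simp only [Option.map_some] at ihd ⊢
        rw [hget, hgcd]
        exact ihd
      · -- head c stays at least as good: reduce to the list (c :: t)
        have hck : pvKey c ≤ pvKey d := le_of_not_gt h
        have hmin : min (pvKey c) (pvKey d) = pvKey c := min_eq_left hck
        rw [hmin]
        have hgcd : pvG c d = c := by simp [pvG, h]
        have ihc := ih c
        by_cases hm : pvKey c = (t.map pvKey).foldl min (pvKey c)
        · rw [← hm] at ihc ⊢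
          rw [PySem.List.index?_cons_self] at ihc ⊢
          rw [hgcd]
          simpa using ihc
        · have hle : (t.map pvKey).foldl min (pvKey c) ≤ pvKey c :=
            (PySem.List.foldl_min_le (t.map pvKey) (pvKey c)).1
          have hlt : (t.map pvKey).foldl min (pvKey c) < pvKey c :=
            lt_of_le_of_ne hle (fun he => hm he.symm)
          have hned : pvKey d ≠ (t.map pvKey).foldl min (pvKey c) := by
            intro he; omega
          have hnec : pvKey c ≠ (t.map pvKey).foldl min (pvKey c) := hm
          have hmem : (t.map pvKey).foldl min (pvKey c) ∈ t.map pvKey := by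
            rcases PySem.List.foldl_min_mem (t.map pvKey) (pvKey c) with h1 | h1
            · exact absurd h1.symm hm
            · exact h1
          obtain ⟨j, hj⟩ := Option.isSome_iff_exists.mp
            ((PySem.List.index?_isSome_iff _ _).mpr hmem)
          rw [PySem.List.index?_cons_of_ne _ hnec, PySem.List.index?_cons_of_ne _ hned, hj]
          rw [PySem.List.index?_cons_of_ne _ hnec, hj] at ihc
          have hget : PySem.List.pyGet? (c :: d :: t) ((j + 1 + 1 : Nat) : Int)
              = PySem.List.pyGet? (c :: t) ((j + 1 : Nat) : Int) := by
            rw [PySem.List.pyGet?_natCast, PySem.List.pyGet?_natCast]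
            simp
          simp only [Option.map_some] at ihc ⊢
          rw [hget, hgcd]
          exact ihc

-- the head of the insertion-sort fold is the first minimal element (stability, head-only view)
lemma head_foldl_insertBy (l : List (List Int)) (h : List Int) (t : List (List Int)) :
    ∃ t', l.foldl (fun acc x => PySem.List.insertBy (fun a b => decide (pvKey a < pvKey b)) x acc) (h :: t)
      = l.foldl pvG h :: t' := by
  induction l generalizing h t with
  | nil => exact ⟨t, rfl⟩
  | cons x xs ih =>
      simp only [List.foldl_cons]
      by_cases hx : pvKey x < pvKey h
      · have hi : PySem.List.insertBy (fun a b => decide (pvKey a < pvKey b)) x (h :: t)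
            = x :: h :: t := by simp [PySem.List.insertBy, hx]
        rw [hi, show pvG h x = x by simp [pvG, hx]]
        exact ih x (h :: t)
      · have hi : PySem.List.insertBy (fun a b => decide (pvKey a < pvKey b)) x (h :: t)
            = h :: PySem.List.insertBy (fun a b => decide (pvKey a < pvKey b)) x t := by
          simp [PySem.List.insertBy, hx]
        rw [hi, show pvG h x = h by simp [pvG, hx]]
        exact ih h _

-- ===== VERDICT (by name: the statement is the Claim_ definition above) =====
theorem suggest_pos_spec : Claim_equal_suggest_pos := by
  intro cells _ hpre
  unfold Spec_suggest_pos
  match cells with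
  | [] => exact absurd rfl hpre
  | c :: l =>
      show suggest_pos (c :: l) = suggest_pos_alt (c :: l)
      have halt : suggest_pos_alt (c :: l) = l.foldl pvG c := by
        unfold suggest_pos_alt
        rw [show (fun cell : List Int =>
            if cell ≠ [] then (PySem.List.pyGet? cell 0).getD 0 else (3 : Int)) = pvKey from rfl]
        rw [PySem.List.sorted_eq_foldl_insertBy]
        simp only [List.foldl_cons]
        rw [show PySem.List.insertBy (fun a b => decide (pvKey a < pvKey b)) c []
            = [c] from rfl]
        obtain ⟨t', ht⟩ := head_foldl_insertBy l c []
        rw [ht]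
        simp [PySem.List.pyGet?, PySem.List.pyIdx?]
      unfold suggest_pos
      simp only [arr_eq_map, List.map_cons]
      rw [PySem.List.min?_id_cons]
      rw [halt]
      exact main_lemma l c
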